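-- pv_equiv track=rewrite | github.com/Abeldewit/advent-of-code | advent_of_code/2023/14/14.py | boulder_optim
-- ===== SOURCE A (Python) =====
-- def boulder_optim(grid, direction='N'):
--     H, W = len(grid), len(grid[0])
--     if direction == 'N':
--         for x in range(W):
--             dy = 0
--             for y in range(H):
--                 ch = grid[y][x]
--                 if ch == '.':
--                     dy += 1
--                 if ch == '#':
--                     dy = 0
--                 elif ch == 'O':
--                     grid[y][x] = '.'
--                     grid[y-dy][x] = 'O'
--     elif direction == 'S':
--         for x in range(W):
--             dy = 0
--             for y in range(H-1, -1, -1):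
--                 ch = grid[y][x]
--                 if ch == '.':
--                     dy += 1
--                 elif ch == '#':
--                     dy = 0
--                 elif ch == 'O':
--                     grid[y][x] = '.'
--                     grid[y+dy][x] = 'O'
--     elif direction == 'E':
--         for y in range(H):
--             dx = 0
--             for x in range(W-1, -1, -1):
--                 ch = grid[y][x]
--                 if ch == '.':
--                     dx += 1
--                 elif ch == '#':
--                     dx = 0
--                 elif ch == 'O':
--                     grid[y][x] = '.'
--                     grid[y][x+dx] = 'O'
--     elif direction == 'W':
--         for y in range(H):
--             dx = 0
--             for x in range(W):
--                 ch = grid[y][x]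
--                 if ch == '.':
--                     dx += 1
--                 elif ch == '#':
--                     dx = 0
--                 elif ch == 'O':
--                     grid[y][x] = '.'
--                     grid[y][x-dx] = 'O'
--     return grid
-- ===== SOURCE B (Python) =====
-- # B: per-line closed-form packing. Extract each column (N/S) or row prefix (E/W),
-- # split it on '#', and for each segment place the k-th 'O' at the index equal to the
-- # number of non-'.' cells before it (all other cells keep their value, vacated 'O'
-- # cells become '.'); write the line back. Mutates grid in place like A.
--
-- def _pack(seg):
--     out = [c if c != 'O' else '.' for c in seg]
--     nd = 0
--     for c in seg:
--         if c != '.':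
--             if c == 'O':
--                 out[nd] = 'O'
--             nd += 1
--     return out
--
--
-- def _roll_line(line):
--     res = []
--     seg = []
--     for c in line:
--         if c == '#':
--             res.extend(_pack(seg))
--             res.append('#')
--             seg = []
--         else:
--             seg.append(c)
--     res.extend(_pack(seg))
--     return res
--
--
-- def boulder_optim(grid, direction='N'):
--     H, W = len(grid), len(grid[0])
--     if direction in ('N', 'S'):
--         for x in range(W):
--             col = [grid[y][x] for y in range(H)]
--             new = _roll_line(col[::-1])[::-1] if direction == 'S' else _roll_line(col)
--             for y in range(H):
--                 grid[y][x] = new[y]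
--     elif direction in ('E', 'W'):
--         for y in range(H):
--             row = grid[y][:W]
--             new = _roll_line(row[::-1])[::-1] if direction == 'E' else _roll_line(row)
--             grid[y][:W] = new
--     return grid
-- ===== Notes on version B (the rewrite author's own statement) =====
-- stated objective: alternative
-- what changed: B extracts each column/row as a line, splits it on '#' and packs every segment in closed form (the k-th 'O' goes to the index equal to the count of non-'.' cells before it), writing the line back, instead of A's per-cell sliding distance counter with in-place cell swaps.
import Mathlib
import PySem

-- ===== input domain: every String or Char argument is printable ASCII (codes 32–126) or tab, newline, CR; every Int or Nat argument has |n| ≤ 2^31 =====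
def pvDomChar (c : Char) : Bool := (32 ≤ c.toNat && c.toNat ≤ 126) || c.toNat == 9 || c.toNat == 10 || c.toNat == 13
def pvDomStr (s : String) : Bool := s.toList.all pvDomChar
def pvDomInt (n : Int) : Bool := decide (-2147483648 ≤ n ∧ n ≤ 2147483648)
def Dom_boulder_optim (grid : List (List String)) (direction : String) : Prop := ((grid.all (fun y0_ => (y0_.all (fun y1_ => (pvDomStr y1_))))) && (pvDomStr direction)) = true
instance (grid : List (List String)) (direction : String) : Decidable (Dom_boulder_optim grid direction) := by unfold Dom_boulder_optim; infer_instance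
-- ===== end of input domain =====

-- B rolls each line by splitting it on '#' and packing every segment in closed form
-- (the k-th 'O' goes to the index equal to the count of non-'.' cells before it) instead
-- of A's per-cell sliding distance counter; same cost, different decomposition.
-- Both Pythons mutate `grid` in place and return it; the theorems are about the value.

-- B rolls each line by splitting it on '#' and packing every segment in closed form
-- (the k-th 'O' goes to the index equal to the count of non-'.' cells before it) instead
-- of A's per-cell sliding distance counter; same asymptotic cost, different decomposition.
-- Both Pythons mutate `grid` in place and return it; the theorems are about the return value.

-- ===== PORT A =====
-- grid[y][x] read / write (indices here are always nonnegative and, inside Pre_, in range;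
-- out-of-range reads/writes, on which Python raises IndexError, yield ""/no-op and are excluded by Pre_)
def pvGet2 (g : List (List String)) (y x : Nat) : String := (g.getD y []).getD x ""

def pvSet2 (g : List (List String)) (y x : Nat) (v : String) : List (List String) :=
  g.modify y (fun row => row.set x v)

def stepN (x : Nat) (st : List (List String) × Nat) (y : Nat) : List (List String) × Nat :=
  let ch := pvGet2 st.1 y x
  let dy := if ch == "." then st.2 + 1 else st.2
  if ch == "#" then (st.1, 0)
  else if ch == "O" then (pvSet2 (pvSet2 st.1 y x ".") (y - dy) x "O", dy)
  else (st.1, dy)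

def stepS (x : Nat) (st : List (List String) × Nat) (y : Nat) : List (List String) × Nat :=
  let ch := pvGet2 st.1 y x
  if ch == "." then (st.1, st.2 + 1)
  else if ch == "#" then (st.1, 0)
  else if ch == "O" then (pvSet2 (pvSet2 st.1 y x ".") (y + st.2) x "O", st.2)
  else (st.1, st.2)

def stepE (y : Nat) (st : List (List String) × Nat) (x : Nat) : List (List String) × Nat :=
  let ch := pvGet2 st.1 y x
  if ch == "." then (st.1, st.2 + 1)
  else if ch == "#" then (st.1, 0)
  else if ch == "O" then (pvSet2 (pvSet2 st.1 y x ".") y (x + st.2) "O", st.2)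
  else (st.1, st.2)

def stepW (y : Nat) (st : List (List String) × Nat) (x : Nat) : List (List String) × Nat :=
  let ch := pvGet2 st.1 y x
  if ch == "." then (st.1, st.2 + 1)
  else if ch == "#" then (st.1, 0)
  else if ch == "O" then (pvSet2 (pvSet2 st.1 y x ".") y (x - st.2) "O", st.2)
  else (st.1, st.2)

-- A's loops: one step function per direction (state = (grid, dy/dx)), exactly A's branch order.
-- `y - dy` / `x - st.2` use Nat subtraction: in A's execution dy ≤ y always holds (dy starts at 0
-- and grows at most once per cell), so Python never sees a negative index there.
-- range(H-1,-1,-1) is (List.range H).reverse.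
def boulder_optim (grid : List (List String)) (direction : String) : List (List String) :=
  let H := grid.length
  let W := (grid.getD 0 []).length
  if direction == "N" then
    (List.range W).foldl (fun g x => ((List.range H).foldl (stepN x) (g, 0)).1) grid
  else if direction == "S" then
    (List.range W).foldl (fun g x => (((List.range H).reverse).foldl (stepS x) (g, 0)).1) grid
  else if direction == "E" then
    (List.range H).foldl (fun g y => (((List.range W).reverse).foldl (stepE y) (g, 0)).1) grid
  else if direction == "W" then
    (List.range H).foldl (fun g y => ((List.range W).foldl (stepW y) (g, 0)).1) grid
  else grid

-- ===== PORT B =====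
-- _pack: out = seg with 'O' blanked; each 'O' is rewritten at index nd = #non-'.' cells before it
def packStep (st : List String × Nat) (c : String) : List String × Nat :=
  if c != "." then (if c == "O" then (st.1.set st.2 "O", st.2 + 1) else (st.1, st.2 + 1)) else st

def packB (seg : List String) : List String :=
  (seg.foldl packStep (seg.map (fun c => if c == "O" then "." else c), 0)).1

def rollStep (st : List String × List String) (c : String) : List String × List String :=
  if c == "#" then (st.1 ++ packB st.2 ++ ["#"], []) else (st.1, st.2 ++ [c])

def rollLineB (line : List String) : List String :=
  let st := line.foldl rollStep ([], [])
  st.1 ++ packB st.2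

-- line[::-1] is List.reverse; grid[y][:W] is List.take W; the slice assignment
-- grid[y][:W] = new (len(new) = W) re-assembles the row as new ++ row[W:].
def boulder_optim_alt (grid : List (List String)) (direction : String) : List (List String) :=
  let H := grid.length
  let W := (grid.getD 0 []).length
  if direction == "N" || direction == "S" then
    (List.range W).foldl (fun g x =>
      let col := (List.range H).map (fun y => pvGet2 g y x)
      let new := if direction == "S" then (rollLineB col.reverse).reverse else rollLineB col
      (List.range H).foldl (fun g y => pvSet2 g y x (new.getD y "")) g) grid
  else if direction == "E" || direction == "W" then
    (List.range H).foldl (fun g y =>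
      let row := (g.getD y []).take W
      let new := if direction == "E" then (rollLineB row.reverse).reverse else rollLineB row
      g.set y (new ++ (g.getD y []).drop W)) grid
  else grid

-- ===== PRECONDITION & SPEC =====
-- Pre_ excludes exactly the inputs on which Python A raises IndexError: the empty grid
-- (len(grid[0])), and, for the four real directions, grids with a row shorter than row 0.
def Pre_boulder_optim (grid : List (List String)) (direction : String) : Prop :=
  grid ≠ [] ∧ ((direction = "N" ∨ direction = "S" ∨ direction = "E" ∨ direction = "W") →
    ∀ row ∈ grid, (grid.headD []).length ≤ row.length)
instance (grid : List (List String)) (direction : String) : Decidable (Pre_boulder_optim grid direction) := by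
  unfold Pre_boulder_optim; infer_instance

def pvWitness_boulder_optim : List (List String) × String :=
  ([["O", "."], [".", "O"], ["#", "."]], "N")

def Spec_boulder_optim (grid : List (List String)) (direction : String) (out : List (List String)) : Prop := out = boulder_optim_alt grid direction
instance (grid : List (List String)) (direction : String) (out : List (List String)) : Decidable (Spec_boulder_optim grid direction out) := by unfold Spec_boulder_optim; infer_instance

-- ===== CLAIM (what is proved, stated in full; the proofs are below) =====
def Claim_equal_boulder_optim : Prop := ∀ (grid : List (List String)) (direction : String), Dom_boulder_optim grid direction → Pre_boulder_optim grid direction → Spec_boulder_optim grid direction (boulder_optim grid direction)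

-- ===== LEMMAS AND PROOFS =====

def goA : List String → Nat → List String → List String × Nat
  | acc, dy, [] => (acc, dy)
  | acc, dy, c :: cs =>
    if c = "." then goA (acc ++ [c]) (dy + 1) cs
    else if c = "#" then goA (acc ++ [c]) 0 cs
    else if c = "O" then goA ((acc ++ ["."]).set (acc.length - dy) "O") dy cs
    else goA (acc ++ [c]) dy cs

def wcol (x : Nat) (t : List String) (g : List (List String)) : List (List String) :=
  List.zipWith (fun row v => row.set x v) g t

def colF (x : Nat) (g : List (List String)) : List String :=
  g.map (fun row => row.getD x "")

def InvG (H W : Nat) (g : List (List String)) : Prop :=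
  g.length = H ∧ ∀ i, (hi : i < g.length) → W ≤ g[i].length

theorem L_pack_fold_len (cells : List String) : ∀ (out : List String) (nd : Nat),
    ((List.foldl packStep (out, nd) cells).1).length = out.length := by
  induction cells with
  | nil => intro out nd; rfl
  | cons c cs ih =>
    intro out nd
    simp only [List.foldl_cons, packStep]
    split_ifs <;> simp [ih]

theorem L_pack_fold_snd (cells : List String) : ∀ (out : List String) (nd : Nat),
    (List.foldl packStep (out, nd) cells).2 = nd + cells.countP (fun c => !(c == ".")) := by
  induction cells with
  | nil => intro out nd; simp
  | cons c cs ih =>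
    intro out nd
    simp only [List.foldl_cons, packStep, List.countP_cons]
    split_ifs with h1 h2 <;> simp_all <;> omega

theorem L_pack_fold_append (cells : List String) : ∀ (out tail : List String) (nd : Nat),
    nd + cells.length ≤ out.length →
    List.foldl packStep (out ++ tail, nd) cells =
      ((List.foldl packStep (out, nd) cells).1 ++ tail, (List.foldl packStep (out, nd) cells).2) := by
  induction cells with
  | nil => intro out tail nd h; rfl
  | cons c cs ih =>
    intro out tail nd h
    simp only [List.foldl_cons, packStep]
    split_ifs with h1 h2
    · rw [List.set_append_left _ _ (by simp at h ⊢; omega)]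
      exact ih _ _ _ (by simp only [List.length_append, List.length_cons, List.length_nil, List.length_set] at h ⊢; omega)
    · exact ih _ _ _ (by simp only [List.length_append, List.length_cons, List.length_nil, List.length_set] at h ⊢; omega)
    · exact ih _ _ _ (by simp only [List.length_append, List.length_cons, List.length_nil, List.length_set] at h ⊢; omega)

theorem L_packB_length (s : List String) : (packB s).length = s.length := by
  simp [packB, L_pack_fold_len]

theorem L_pack_snoc_dot (p : List String) : packB (p ++ ["."]) = packB p ++ ["."] := by
  simp only [packB, List.map_append, List.foldl_append]
  rw [L_pack_fold_append p _ _ 0 (by simp)]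
  simp [packStep]

theorem L_pack_snoc_other (p : List String) (c : String) (h1 : c ≠ ".") (h2 : c ≠ "O") :
    packB (p ++ [c]) = packB p ++ [c] := by
  simp only [packB, List.map_append, List.foldl_append]
  rw [L_pack_fold_append p _ _ 0 (by simp)]
  simp [packStep, h1, h2]

theorem L_pack_snoc_O (p : List String) :
    packB (p ++ ["O"]) = (packB p ++ ["."]).set (p.countP (fun c => !(c == "."))) "O" := by
  simp only [packB, List.map_append, List.foldl_append]
  rw [L_pack_fold_append p _ _ 0 (by simp)]
  simp [packStep, L_pack_fold_snd]

theorem L_countP_not_add (p : List String) :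
    p.countP (fun c => c == ".") + p.countP (fun c => !(c == ".")) = p.length := by
  induction p with
  | nil => simp
  | cons c cs ih => simp only [List.countP_cons]; by_cases h : c == "." <;> simp [h] <;> omega

theorem L_goA_length (s : List String) : ∀ (acc : List String) (dy : Nat),
    ((goA acc dy s).1).length = acc.length + s.length := by
  induction s with
  | nil => intro acc dy; simp [goA]
  | cons c cs ih =>
    intro acc dy
    simp only [goA]
    split_ifs <;> simp [ih] <;> omega

theorem L_goA_roll (s : List String) : ∀ (res p : List String),
    (goA (res ++ packB p) (p.countP (fun c => c == ".")) s).1 =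
      (s.foldl rollStep (res, p)).1 ++ packB (s.foldl rollStep (res, p)).2 := by
  induction s with
  | nil => intro res p; simp [goA]
  | cons c cs ih =>
    intro res p
    simp only [goA, List.foldl_cons, rollStep]
    by_cases h1 : c = "."
    · subst h1
      have : (res ++ packB p) ++ ["."] = res ++ packB (p ++ ["."]) := by
        rw [L_pack_snoc_dot]; simp
      simp only [if_pos rfl, beq_iff_eq, if_neg (by decide : ("." : String) ≠ "#"), this]
      have hc : (p ++ ["."]).countP (fun c => c == ".") = p.countP (fun c => c == ".") + 1 := by
        simp [List.countP_append]
      rw [← hc]  -- align dy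
      exact ih res (p ++ ["."])
    · by_cases h2 : c = "#"
      · subst h2
        simp only [if_neg h1, if_pos rfl, beq_iff_eq, if_pos rfl]
        have : (res ++ packB p) ++ ["#"] = (res ++ packB p ++ ["#"]) ++ packB [] := by
          simp [packB]
        rw [this]
        have h0 : (0 : Nat) = ([] : List String).countP (fun c => c == ".") := by simp
        rw [h0]
        simpa using ih (res ++ packB p ++ ["#"]) []
      · by_cases h3 : c = "O"
        · subst h3
          simp only [if_neg h1, if_neg h2, if_pos rfl, beq_iff_eq,
            if_neg (by decide : ("O" : String) ≠ "#")]
          have hlen : (res ++ packB p).length = res.length + p.length := by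
            simp [L_packB_length]
          have hle : p.countP (fun c => c == ".") ≤ p.length := List.countP_le_length
          have hidx : (res ++ packB p).length - p.countP (fun c => c == ".") =
              res.length + (p.length - p.countP (fun c => c == ".")) := by
            rw [hlen]; omega
          have hnd : p.length - p.countP (fun c => c == ".") = p.countP (fun c => !(c == ".")) := by
            have := L_countP_not_add p; omega
          have hset : ((res ++ packB p) ++ ["."]).set
              ((res ++ packB p).length - p.countP (fun c => c == ".")) "O" =
              res ++ packB (p ++ ["O"]) := by
            rw [L_pack_snoc_O, hidx, hnd, List.append_assoc,
              List.set_append_right _ _ (by simp)]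
            simp
          rw [hset]
          have hc : (p ++ ["O"]).countP (fun c => c == ".") = p.countP (fun c => c == ".") := by
            simp [List.countP_append]
          rw [← hc]
          exact ih res (p ++ ["O"])
        · simp only [if_neg h1, if_neg h2, if_neg h3, beq_iff_eq, if_neg h2]
          have : (res ++ packB p) ++ [c] = res ++ packB (p ++ [c]) := by
            rw [L_pack_snoc_other p c h1 h3]; simp
          rw [this]
          have hc : (p ++ [c]).countP (fun c => c == ".") = p.countP (fun c => c == ".") := by
            simp [List.countP_append, h1]
          rw [← hc]
          exact ih res (p ++ [c])

theorem L_goA_rollLine (s : List String) : (goA [] 0 s).1 = rollLineB s := by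
  have h := L_goA_roll s [] []
  simpa [packB, rollLineB] using h

theorem L_rollLineB_length (s : List String) : (rollLineB s).length = s.length := by
  rw [← L_goA_rollLine]; simp [L_goA_length]

theorem L_move2 (acc cs : List String) (dy : Nat) :
    (acc ++ "." :: cs).set (acc.length - dy) "O" = ((acc ++ ["."]).set (acc.length - dy) "O") ++ cs := by
  rcases Nat.lt_or_ge (acc.length - dy) acc.length with h | h
  · rw [List.set_append_left _ _ h, List.set_append_left _ _ (by simp; omega)]
    simp [List.set_append_left _ _ h]
  · have he : acc.length - dy = acc.length := by omega
    rw [he, List.set_append_right _ _ le_rfl, List.set_append_right _ _ (by simp)]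
    simp

theorem L_move (acc cs : List String) (dy : Nat) :
    ((acc ++ "O" :: cs).set acc.length ".").set (acc.length - dy) "O" =
      ((acc ++ ["."]).set (acc.length - dy) "O") ++ cs := by
  rw [List.set_append_right _ _ le_rfl]
  simp only [Nat.sub_self, List.set_cons_zero]
  exact L_move2 acc cs dy

theorem L_read_mid (acc cs : List String) (c : String) : (acc ++ c :: cs).getD acc.length "" = c := by
  simp [List.getD_eq_getElem?_getD, List.getElem?_append_right (le_refl acc.length)]

theorem L_reverse_set {α : Type} (l : List α) (i : Nat) (v : α) (h : i < l.length) :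
    l.reverse.set i v = (l.set (l.length - 1 - i) v).reverse := by
  apply List.ext_getElem
  · simp
  · intro j h1 h2
    simp only [List.getElem_set, List.getElem_reverse, List.length_set] at *
    have hj : j < l.length := by simpa using h1
    by_cases hij : i = j
    · subst hij; simp [show l.length - 1 - (l.length - 1 - i) = i by omega]
    · rw [if_neg hij, if_neg (by omega)]

theorem L_read_rev (acc cs : List String) (c : String) :
    ((acc ++ c :: cs).reverse).getD cs.length "" = c := by
  have h : cs.length < (acc ++ c :: cs).length := by
    simp only [List.length_append, List.length_cons]; omega
  rw [List.getD_eq_getElem?_getD, List.getElem?_eq_getElem (by simpa using h)]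
  rw [List.getElem_reverse]
  have he : (acc ++ c :: cs).length - 1 - cs.length = acc.length := by
    simp only [List.length_append, List.length_cons]; omega
  simp only [he]
  simp [List.getElem_append_right]

theorem L_revmove (acc cs : List String) (c : String) (dy : Nat) (h : dy ≤ acc.length) :
    (((acc ++ c :: cs).reverse).set cs.length ".").set (cs.length + dy) "O" =
      (((acc ++ ["."]).set (acc.length - dy) "O") ++ cs).reverse := by
  rw [L_reverse_set _ _ _ (by simp only [List.length_append, List.length_cons]; omega)]
  have h1 : (acc ++ c :: cs).length - 1 - cs.length = acc.length := by
    simp only [List.length_append, List.length_cons]; omega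
  rw [h1]
  have h2 : (acc ++ c :: cs).set acc.length "." = acc ++ "." :: cs := by
    rw [List.set_append_right _ _ le_rfl]; simp
  rw [h2, L_reverse_set _ _ _ (by simp only [List.length_append, List.length_cons]; omega)]
  have h3 : (acc ++ "." :: cs).length - 1 - (cs.length + dy) = acc.length - dy := by
    simp only [List.length_append, List.length_cons]; omega
  rw [h3, L_move2]

theorem L_wcol_length (x : Nat) (t : List String) (g : List (List String)) (h : t.length = g.length) :
    (wcol x t g).length = g.length := by simp [wcol, h]

theorem L_get2_wcol (g : List (List String)) (t : List String) (y x : Nat)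
    (ht : t.length = g.length) (hy : y < g.length) (hx : ∀ i, (hi : i < g.length) → x < g[i].length) :
    pvGet2 (wcol x t g) y x = t.getD y "" := by
  have hyw : y < (wcol x t g).length := by rw [L_wcol_length x t g ht]; exact hy
  have hyt : y < t.length := by omega
  unfold pvGet2
  rw [List.getD_eq_getElem?_getD (l := wcol x t g), List.getElem?_eq_getElem hyw]
  simp only [wcol, List.getElem_zipWith, Option.getD_some]
  rw [List.getD_eq_getElem?_getD, List.getElem?_eq_getElem (by simp [List.length_set]; exact hx y hy)]
  rw [List.getElem_set_self, List.getD_eq_getElem?_getD, List.getElem?_eq_getElem hyt]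

theorem L_set2_wcol (g : List (List String)) (t : List String) (y x : Nat) (v : String)
    (ht : t.length = g.length) :
    pvSet2 (wcol x t g) y x v = wcol x (t.set y v) g := by
  apply List.ext_getElem
  · simp [pvSet2, wcol, ht]
  · intro j h1 h2
    have hj : j < g.length := by simpa [pvSet2, wcol, ht] using h1
    have hjt : j < t.length := by omega
    simp only [pvSet2, wcol, List.getElem_modify, List.getElem_zipWith, List.getElem_set]
    by_cases hyj : y = j
    · subst hyj; simp [List.set_set]
    · simp [hyj]

theorem L_wcol_colF (x : Nat) (g : List (List String)) : wcol x (colF x g) g = g := by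
  apply List.ext_getElem
  · simp [wcol, colF]
  · intro j h1 h2
    simp only [wcol, colF, List.getElem_zipWith, List.getElem_map]
    by_cases hx : x < g[j].length
    · rw [List.getD_eq_getElem?_getD, List.getElem?_eq_getElem hx]
      exact List.set_getElem_self (by simpa using hx)
    · exact List.set_eq_of_length_le (by omega)

theorem L_colB (x : Nat) (g : List (List String)) :
    (List.range g.length).map (fun y => pvGet2 g y x) = colF x g := by
  apply List.ext_getElem
  · simp [colF]
  · intro j h1 h2
    have hj : j < g.length := by simpa using h1
    simp only [List.getElem_map, List.getElem_range, colF, pvGet2]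
    rw [List.getD_eq_getElem?_getD (l := g), List.getElem?_eq_getElem hj]
    rfl

theorem L_set2_append (p s : List (List String)) (row : List String) (x : Nat) (v : String) :
    pvSet2 (p ++ row :: s) p.length x v = p ++ row.set x v :: s := by
  induction p with
  | nil => simp [pvSet2, List.modify]
  | cons a q ih => simpa [pvSet2, List.modify] using ih

theorem L_wb (x : Nat) (new : List String) : ∀ (s p : List (List String)),
    p.length + s.length ≤ new.length →
    (List.range' p.length s.length).foldl (fun g y => pvSet2 g y x (new.getD y "")) (p ++ s) =
      p ++ wcol x (new.drop p.length) s := by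
  intro s
  induction s with
  | nil => intro p h; simp [wcol]
  | cons row rest ih =>
    intro p h
    simp only [List.length_cons, List.range'_succ, List.foldl_cons]
    rw [L_set2_append]
    have hlt : p.length < new.length := by simp at h; omega
    have hdrop : new.drop p.length = new[p.length] :: new.drop (p.length + 1) :=
      List.drop_eq_getElem_cons hlt
    have hgetD : new.getD p.length "" = new[p.length] := by
      rw [List.getD_eq_getElem?_getD, List.getElem?_eq_getElem hlt]; rfl
    have this := ih (p ++ [row.set x (new.getD p.length "")])
      (by simp only [List.length_append, List.length_cons, List.length_nil] at h ⊢; omega)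
    have hlen1 : (p ++ [row.set x (new.getD p.length "")]).length = p.length + 1 := by simp
    rw [hlen1, List.append_assoc] at this
    simp only [List.singleton_append] at this
    rw [this, hdrop, hgetD]
    simp only [wcol, List.append_assoc, List.singleton_append]
    rw [List.zipWith_cons_cons]

theorem L_wb0 (x : Nat) (new : List String) (g : List (List String)) (h : g.length ≤ new.length) :
    (List.range g.length).foldl (fun g y => pvSet2 g y x (new.getD y "")) g = wcol x new g := by
  have := L_wb x new g [] (by simpa using h)
  simpa [List.range_eq_range'] using this

theorem L_get2_set (g : List (List String)) (y x : Nat) (r : List String) (hy : y < g.length) :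
    pvGet2 (g.set y r) y x = r.getD x "" := by
  unfold pvGet2
  rw [List.getD_eq_getElem?_getD (l := g.set y r), List.getElem?_eq_getElem (by simpa using hy)]
  simp [List.getElem_set_self]

theorem L_set2_set (g : List (List String)) (y : Nat) (r : List String) (x : Nat) (v : String) :
    pvSet2 (g.set y r) y x v = g.set y (r.set x v) := by
  by_cases hy : y < g.length
  · apply List.ext_getElem
    · simp [pvSet2]
    · intro j h1 h2
      simp only [pvSet2, List.getElem_modify, List.getElem_set]
      by_cases hyj : y = j <;> simp [hyj]
  · rw [List.set_eq_of_length_le (by omega), List.set_eq_of_length_le (by omega)]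
    apply List.ext_getElem
    · simp [pvSet2]
    · intro j h1 h2
      simp only [pvSet2, List.getElem_modify]
      rw [if_neg (by omega)]

theorem L_set_getD_self (g : List (List String)) (y : Nat) (hy : y < g.length) :
    g.set y (g.getD y []) = g := by
  rw [List.getD_eq_getElem?_getD, List.getElem?_eq_getElem hy]
  exact List.set_getElem_self (by simpa using hy)

theorem L_foldl_inv {α β : Type} (P : α → Prop) (f₁ f₂ : α → β → α) (l : List β) :
    ∀ (a : α), (∀ a b, P a → b ∈ l → f₁ a b = f₂ a b ∧ P (f₂ a b)) → P a →
    l.foldl f₁ a = l.foldl f₂ a := by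
  induction l with
  | nil => intro a _ _; rfl
  | cons b bs ih =>
    intro a hstep hP
    obtain ⟨heq, hP'⟩ := hstep a b hP (by simp)
    simp only [List.foldl_cons, heq]
    exact ih _ (fun a' b' hp hm => hstep a' b' hp (by simp [hm])) hP'

theorem L_inv_wcol (H W : Nat) (g : List (List String)) (x : Nat) (t : List String)
    (hg : InvG H W g) (ht : t.length = g.length) : InvG H W (wcol x t g) := by
  obtain ⟨hlen, hrow⟩ := hg
  refine ⟨by rw [L_wcol_length x t g ht]; exact hlen, ?_⟩
  intro i hi
  have hig : i < g.length := by rwa [L_wcol_length x t g ht] at hi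
  simp only [wcol, List.getElem_zipWith, List.length_set]
  exact hrow i hig

theorem bridgeN (g0 : List (List String)) (x : Nat)
    (hx : ∀ i, (hi : i < g0.length) → x < g0[i].length) :
    ∀ (s acc : List String) (dy : Nat), acc.length + s.length = g0.length →
    (List.range' acc.length s.length).foldl (stepN x) (wcol x (acc ++ s) g0, dy) =
      (wcol x (goA acc dy s).1 g0, (goA acc dy s).2) := by
  intro s
  induction s with
  | nil => intro acc dy h; simp [goA]
  | cons c cs ih =>
    intro acc dy h
    have hlen : (acc ++ c :: cs).length = g0.length := by simpa using h
    have hy : acc.length < g0.length := by simp at h; omega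
    have hread : pvGet2 (wcol x (acc ++ c :: cs) g0) acc.length x = c := by
      rw [L_get2_wcol g0 _ _ _ hlen hy hx, L_read_mid]
    simp only [List.length_cons, List.range'_succ, List.foldl_cons]
    rw [show stepN x (wcol x (acc ++ c :: cs) g0, dy) acc.length =
        (if c = "#" then (wcol x (acc ++ c :: cs) g0, 0)
         else if c = "O" then
           (pvSet2 (pvSet2 (wcol x (acc ++ c :: cs) g0) acc.length x ".")
             (acc.length - (if c = "." then dy + 1 else dy)) x "O", if c = "." then dy + 1 else dy)
         else (wcol x (acc ++ c :: cs) g0, if c = "." then dy + 1 else dy))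
      from by simp only [stepN, hread, beq_iff_eq]]
    by_cases h1 : c = "."
    · subst h1
      rw [if_neg (by decide), if_neg (by decide), if_pos rfl]
      have : acc ++ "." :: cs = (acc ++ ["."]) ++ cs := by simp
      rw [this]
      have := ih (acc ++ ["."]) (dy + 1) (by simp only [List.length_append, List.length_cons, List.length_nil, List.length_set] at h ⊢; omega)
      simpa [goA] using this
    · by_cases h2 : c = "#"
      · subst h2
        rw [if_pos rfl]
        have : acc ++ "#" :: cs = (acc ++ ["#"]) ++ cs := by simp
        rw [this]
        have := ih (acc ++ ["#"]) 0 (by simp only [List.length_append, List.length_cons, List.length_nil, List.length_set] at h ⊢; omega)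
        simpa [goA, h1] using this
      · by_cases h3 : c = "O"
        · subst h3
          rw [if_neg h2, if_pos rfl, if_neg h1]
          rw [L_set2_wcol g0 _ _ _ _ hlen,
              L_set2_wcol g0 _ _ _ _ (by simpa using hlen)]
          rw [L_move]
          have heq : ((acc ++ ["."]).set (acc.length - dy) "O").length = acc.length + 1 := by simp
          have := ih ((acc ++ ["."]).set (acc.length - dy) "O") dy
            (by rw [heq]; simp at h ⊢; omega)
          rw [heq] at this
          rw [this]
          simp [goA, h1, h2]
        · rw [if_neg h2, if_neg h3]
          have : acc ++ c :: cs = (acc ++ [c]) ++ cs := by simp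
          rw [this, if_neg h1]
          have := ih (acc ++ [c]) dy (by simp only [List.length_append, List.length_cons, List.length_nil, List.length_set] at h ⊢; omega)
          simpa [goA, h1, h2, h3] using this

theorem bridgeS (g0 : List (List String)) (x : Nat)
    (hx : ∀ i, (hi : i < g0.length) → x < g0[i].length) :
    ∀ (s acc : List String) (dy : Nat), dy ≤ acc.length → acc.length + s.length = g0.length →
    ((List.range s.length).reverse).foldl (stepS x) (wcol x ((acc ++ s).reverse) g0, dy) =
      (wcol x ((goA acc dy s).1).reverse g0, (goA acc dy s).2) := by
  intro s
  induction s with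
  | nil => intro acc dy hdy h; simp [goA]
  | cons c cs ih =>
    intro acc dy hdy h
    have hlen : ((acc ++ c :: cs).reverse).length = g0.length := by
      simp only [List.length_reverse, List.length_append, List.length_cons] at h ⊢; omega
    have hy : cs.length < g0.length := by
      simp only [List.length_append, List.length_cons] at h; omega
    have hread : pvGet2 (wcol x ((acc ++ c :: cs).reverse) g0) cs.length x = c := by
      rw [L_get2_wcol g0 _ _ _ hlen hy hx, L_read_rev]
    have hrange : ((List.range (c :: cs).length).reverse) =
        cs.length :: (List.range cs.length).reverse := by
      simp [List.range_succ]
    rw [hrange]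
    simp only [List.foldl_cons]
    rw [show stepS x (wcol x ((acc ++ c :: cs).reverse) g0, dy) cs.length =
        (if c = "." then (wcol x ((acc ++ c :: cs).reverse) g0, dy + 1)
         else if c = "#" then (wcol x ((acc ++ c :: cs).reverse) g0, 0)
         else if c = "O" then
           (pvSet2 (pvSet2 (wcol x ((acc ++ c :: cs).reverse) g0) cs.length x ".")
             (cs.length + dy) x "O", dy)
         else (wcol x ((acc ++ c :: cs).reverse) g0, dy))
      from by simp only [stepS, hread, beq_iff_eq]]
    by_cases h1 : c = "."
    · subst h1
      rw [if_pos rfl]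
      have hre : (acc ++ "." :: cs).reverse = ((acc ++ ["."]) ++ cs).reverse := by simp
      rw [hre]
      have := ih (acc ++ ["."]) (dy + 1) (by simp; omega) (by simp only [List.length_append, List.length_cons, List.length_nil, List.length_set] at h ⊢; omega)
      simpa [goA] using this
    · by_cases h2 : c = "#"
      · subst h2
        rw [if_neg h1, if_pos rfl]
        have hre : (acc ++ "#" :: cs).reverse = ((acc ++ ["#"]) ++ cs).reverse := by simp
        rw [hre]
        have := ih (acc ++ ["#"]) 0 (by simp) (by simp only [List.length_append, List.length_cons, List.length_nil, List.length_set] at h ⊢; omega)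
        simpa [goA, h1] using this
      · by_cases h3 : c = "O"
        · subst h3
          rw [if_neg h1, if_neg h2, if_pos rfl]
          rw [L_set2_wcol g0 _ _ _ _ hlen,
              L_set2_wcol g0 _ _ _ _ (by simpa using hlen)]
          rw [L_revmove acc cs "O" dy hdy]
          have heq : ((acc ++ ["."]).set (acc.length - dy) "O").length = acc.length + 1 := by simp
          have := ih ((acc ++ ["."]).set (acc.length - dy) "O") dy
            (by rw [heq]; omega) (by rw [heq]; simp at h ⊢; omega)
          rw [this]
          simp [goA, h1, h2]
        · rw [if_neg h1, if_neg h2, if_neg h3]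
          have hre : (acc ++ c :: cs).reverse = ((acc ++ [c]) ++ cs).reverse := by simp
          rw [hre]
          have := ih (acc ++ [c]) dy (by simp; omega) (by simp only [List.length_append, List.length_cons, List.length_nil, List.length_set] at h ⊢; omega)
          simpa [goA, h1, h2, h3] using this

theorem bridgeW (g0 : List (List String)) (y : Nat) (tail : List String) (hy : y < g0.length) :
    ∀ (s acc : List String) (dx : Nat),
    (List.range' acc.length s.length).foldl (stepW y) (g0.set y (acc ++ s ++ tail), dx) =
      (g0.set y ((goA acc dx s).1 ++ tail), (goA acc dx s).2) := by
  intro s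
  induction s with
  | nil => intro acc dx; simp [goA]
  | cons c cs ih =>
    intro acc dx
    have hread : pvGet2 (g0.set y (acc ++ c :: cs ++ tail)) y acc.length = c := by
      rw [L_get2_set g0 y acc.length _ hy]
      have : acc ++ c :: cs ++ tail = acc ++ c :: (cs ++ tail) := by simp
      rw [this, L_read_mid]
    simp only [List.length_cons, List.range'_succ, List.foldl_cons]
    rw [show stepW y (g0.set y (acc ++ c :: cs ++ tail), dx) acc.length =
        (if c = "." then (g0.set y (acc ++ c :: cs ++ tail), dx + 1)
         else if c = "#" then (g0.set y (acc ++ c :: cs ++ tail), 0)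
         else if c = "O" then
           (pvSet2 (pvSet2 (g0.set y (acc ++ c :: cs ++ tail)) y acc.length ".")
             y (acc.length - dx) "O", dx)
         else (g0.set y (acc ++ c :: cs ++ tail), dx))
      from by simp only [stepW, hread, beq_iff_eq]]
    by_cases h1 : c = "."
    · subst h1
      rw [if_pos rfl]
      have hre : acc ++ "." :: cs ++ tail = (acc ++ ["."]) ++ cs ++ tail := by simp
      rw [hre]
      have := ih (acc ++ ["."]) (dx + 1)
      simpa [goA] using this
    · by_cases h2 : c = "#"
      · subst h2
        rw [if_neg h1, if_pos rfl]
        have hre : acc ++ "#" :: cs ++ tail = (acc ++ ["#"]) ++ cs ++ tail := by simp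
        rw [hre]
        have := ih (acc ++ ["#"]) 0
        simpa [goA, h1] using this
      · by_cases h3 : c = "O"
        · subst h3
          rw [if_neg h1, if_neg h2, if_pos rfl]
          rw [L_set2_set, L_set2_set]
          have hrow : ((acc ++ "O" :: cs ++ tail).set acc.length ".").set (acc.length - dx) "O" =
              (((acc ++ ["."]).set (acc.length - dx) "O") ++ cs) ++ tail := by
            have h4 : acc ++ "O" :: cs ++ tail = acc ++ "O" :: (cs ++ tail) := by simp
            rw [h4, L_move acc (cs ++ tail) dx]
            simp
          rw [hrow]
          have heq : ((acc ++ ["."]).set (acc.length - dx) "O").length = acc.length + 1 := by simp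
          have := ih ((acc ++ ["."]).set (acc.length - dx) "O") dx
          rw [heq] at this
          rw [this]
          simp [goA, h1, h2]
        · rw [if_neg h1, if_neg h2, if_neg h3]
          have hre : acc ++ c :: cs ++ tail = (acc ++ [c]) ++ cs ++ tail := by simp
          rw [hre]
          have := ih (acc ++ [c]) dx
          simpa [goA, h1, h2, h3] using this

theorem bridgeE (g0 : List (List String)) (y : Nat) (tail : List String) (hy : y < g0.length) :
    ∀ (s acc : List String) (dx : Nat), dx ≤ acc.length →
    ((List.range s.length).reverse).foldl (stepE y) (g0.set y ((acc ++ s).reverse ++ tail), dx) =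
      (g0.set y (((goA acc dx s).1).reverse ++ tail), (goA acc dx s).2) := by
  intro s
  induction s with
  | nil => intro acc dx hdx; simp [goA]
  | cons c cs ih =>
    intro acc dx hdx
    have hsplit : (acc ++ c :: cs).reverse ++ tail = cs.reverse ++ c :: (acc.reverse ++ tail) := by
      simp
    have hread : pvGet2 (g0.set y ((acc ++ c :: cs).reverse ++ tail)) y cs.length = c := by
      rw [L_get2_set g0 y cs.length _ hy, hsplit]
      have : cs.length = (cs.reverse).length := by simp
      rw [this, L_read_mid]
    have hrange : ((List.range (c :: cs).length).reverse) =
        cs.length :: (List.range cs.length).reverse := by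
      simp [List.range_succ]
    rw [hrange]
    simp only [List.foldl_cons]
    rw [show stepE y (g0.set y ((acc ++ c :: cs).reverse ++ tail), dx) cs.length =
        (if c = "." then (g0.set y ((acc ++ c :: cs).reverse ++ tail), dx + 1)
         else if c = "#" then (g0.set y ((acc ++ c :: cs).reverse ++ tail), 0)
         else if c = "O" then
           (pvSet2 (pvSet2 (g0.set y ((acc ++ c :: cs).reverse ++ tail)) y cs.length ".")
             y (cs.length + dx) "O", dx)
         else (g0.set y ((acc ++ c :: cs).reverse ++ tail), dx))
      from by simp only [stepE, hread, beq_iff_eq]]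
    by_cases h1 : c = "."
    · subst h1
      rw [if_pos rfl]
      have hre : (acc ++ "." :: cs).reverse ++ tail = ((acc ++ ["."]) ++ cs).reverse ++ tail := by
        simp
      rw [hre]
      have := ih (acc ++ ["."]) (dx + 1) (by simp; omega)
      simpa [goA] using this
    · by_cases h2 : c = "#"
      · subst h2
        rw [if_neg h1, if_pos rfl]
        have hre : (acc ++ "#" :: cs).reverse ++ tail = ((acc ++ ["#"]) ++ cs).reverse ++ tail := by
          simp
        rw [hre]
        have := ih (acc ++ ["#"]) 0 (by simp)
        simpa [goA, h1] using this
      · by_cases h3 : c = "O"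
        · subst h3
          rw [if_neg h1, if_neg h2, if_pos rfl]
          rw [L_set2_set, L_set2_set]
          have hrow : (((acc ++ "O" :: cs).reverse ++ tail).set cs.length ".").set
              (cs.length + dx) "O" =
              (((acc ++ ["."]).set (acc.length - dx) "O") ++ cs).reverse ++ tail := by
            rw [List.set_append_left _ _ (by simp only [List.length_reverse,
              List.length_append, List.length_cons]; omega)]
            rw [List.set_append_left _ _ (by simp only [List.length_set, List.length_reverse,
              List.length_append, List.length_cons]; omega)]
            rw [L_revmove acc cs "O" dx hdx]
          rw [hrow]
          have heq : ((acc ++ ["."]).set (acc.length - dx) "O").length = acc.length + 1 := by simp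
          have := ih ((acc ++ ["."]).set (acc.length - dx) "O") dx (by rw [heq]; omega)
          rw [this]
          simp [goA, h1, h2]
        · rw [if_neg h1, if_neg h2, if_neg h3]
          have hre : (acc ++ c :: cs).reverse ++ tail = ((acc ++ [c]) ++ cs).reverse ++ tail := by
            simp
          rw [hre]
          have := ih (acc ++ [c]) dx (by simp; omega)
          simpa [goA, h1, h2, h3] using this

theorem L_colN (H W x : Nat) (g : List (List String)) (hg : InvG H W g) (hx : x < W) :
    ((List.range H).foldl (stepN x) (g, 0)).1 = wcol x (rollLineB (colF x g)) g := by
  obtain ⟨hH, hrow⟩ := hg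
  have hx' : ∀ i, (hi : i < g.length) → x < g[i].length :=
    fun i hi => lt_of_lt_of_le hx (hrow i hi)
  have hlen : (colF x g).length = g.length := by simp [colF]
  have hb := bridgeN g x hx' (colF x g) [] 0 (by simpa using hlen)
  rw [List.nil_append, L_wcol_colF] at hb
  rw [List.range_eq_range', ← hH]
  simp only [List.length_nil] at hb
  rw [← hlen, hb, L_goA_rollLine]

theorem L_colS (H W x : Nat) (g : List (List String)) (hg : InvG H W g) (hx : x < W) :
    (((List.range H).reverse).foldl (stepS x) (g, 0)).1 =
      wcol x ((rollLineB ((colF x g).reverse)).reverse) g := by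
  obtain ⟨hH, hrow⟩ := hg
  have hx' : ∀ i, (hi : i < g.length) → x < g[i].length :=
    fun i hi => lt_of_lt_of_le hx (hrow i hi)
  have hlen : (colF x g).length = g.length := by simp [colF]
  have hb := bridgeS g x hx' ((colF x g).reverse) [] 0 (by simp)
    (by simpa using hlen)
  rw [List.nil_append, List.reverse_reverse, L_wcol_colF] at hb
  rw [hH] at hlen
  rw [show (List.range H).reverse = (List.range ((colF x g).reverse).length).reverse by
    simp [hlen]]
  rw [hb, L_goA_rollLine]

theorem L_rowW (H W y : Nat) (g : List (List String)) (hg : InvG H W g) (hy : y < H) :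
    ((List.range W).foldl (stepW y) (g, 0)).1 =
      g.set y (rollLineB ((g.getD y []).take W) ++ (g.getD y []).drop W) := by
  obtain ⟨hH, hrow⟩ := hg
  have hyg : y < g.length := by omega
  have hWrow : W ≤ (g.getD y []).length := by
    rw [List.getD_eq_getElem?_getD, List.getElem?_eq_getElem hyg, Option.getD_some]
    exact hrow y hyg
  have hslen : ((g.getD y []).take W).length = W := by
    rw [List.length_take]; exact Nat.min_eq_left hWrow
  have hb := bridgeW g y ((g.getD y []).drop W) hyg ((g.getD y []).take W) [] 0
  rw [List.nil_append, List.take_append_drop, L_set_getD_self g y hyg] at hb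
  rw [show List.range W = List.range' ([] : List String).length ((g.getD y []).take W).length by
    rw [hslen]; simp [List.range_eq_range']]
  rw [hb, L_goA_rollLine]

theorem L_rowE (H W y : Nat) (g : List (List String)) (hg : InvG H W g) (hy : y < H) :
    (((List.range W).reverse).foldl (stepE y) (g, 0)).1 =
      g.set y ((rollLineB (((g.getD y []).take W).reverse)).reverse ++ (g.getD y []).drop W) := by
  obtain ⟨hH, hrow⟩ := hg
  have hyg : y < g.length := by omega
  have hWrow : W ≤ (g.getD y []).length := by
    rw [List.getD_eq_getElem?_getD, List.getElem?_eq_getElem hyg, Option.getD_some]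
    exact hrow y hyg
  have hslen : ((g.getD y []).take W).length = W := by
    rw [List.length_take]; exact Nat.min_eq_left hWrow
  have hb := bridgeE g y ((g.getD y []).drop W) hyg (((g.getD y []).take W).reverse) [] 0 (by simp)
  rw [List.nil_append, List.reverse_reverse, List.take_append_drop, L_set_getD_self g y hyg] at hb
  rw [show (List.range W).reverse =
      (List.range (((g.getD y []).take W).reverse).length).reverse by
    rw [List.length_reverse, hslen]]
  rw [hb, L_goA_rollLine]

theorem L_inv_set_row (H W : Nat) (g : List (List String)) (y : Nat) (r : List String)
    (hg : InvG H W g) (hr : W ≤ r.length) : InvG H W (g.set y r) := by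
  obtain ⟨hH, hrow⟩ := hg
  refine ⟨by simpa using hH, ?_⟩
  intro i hi
  have hig : i < g.length := by simpa using hi
  rw [List.getElem_set]
  by_cases hyi : y = i
  · simpa [hyi] using hr
  · rw [if_neg hyi]; exact hrow i hig

theorem main_eq (grid : List (List String)) (direction : String)
    (hpre : Pre_boulder_optim grid direction) :
    boulder_optim grid direction = boulder_optim_alt grid direction := by
  obtain ⟨hne, hrows⟩ := hpre
  have hhd : grid.headD ([] : List String) = grid.getD 0 [] := by cases grid <;> simp
  by_cases hN : direction = "N"
  · subst hN
    have hinv : InvG grid.length (grid.getD 0 []).length grid := by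
      refine ⟨rfl, ?_⟩
      intro i hi
      have := hrows (by left; rfl) grid[i] (List.getElem_mem hi)
      rwa [hhd] at this
    simp only [boulder_optim, boulder_optim_alt]
    rw [if_pos (by decide : (("N":String) == "N") = true),
        if_pos (by decide : ((("N":String) == "N") || (("N":String) == "S")) = true)]
    simp only [show (("N":String) == "S") = false from rfl, Bool.false_eq_true, if_false]
    apply L_foldl_inv (InvG grid.length (grid.getD 0 []).length) _ _ _ grid _ hinv
    intro g x hP hmem
    have hxW : x < (grid.getD 0 []).length := List.mem_range.mp hmem
    have hnew : (rollLineB (colF x g)).length = g.length := by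
      simp [L_rollLineB_length, colF]
    constructor
    · rw [L_colN grid.length (grid.getD 0 []).length x g hP hxW]
      rw [show (List.range grid.length).map (fun y => pvGet2 g y x) =
          (List.range g.length).map (fun y => pvGet2 g y x) by rw [hP.1]]
      rw [L_colB, show List.range grid.length = List.range g.length by rw [hP.1]]
      rw [L_wb0 x (rollLineB (colF x g)) g (by omega)]
    · rw [show (List.range grid.length).map (fun y => pvGet2 g y x) =
          (List.range g.length).map (fun y => pvGet2 g y x) by rw [hP.1]]
      rw [L_colB, show List.range grid.length = List.range g.length by rw [hP.1]]
      rw [L_wb0 x (rollLineB (colF x g)) g (by omega)]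
      exact L_inv_wcol _ _ g x _ hP (by omega)
  · by_cases hS : direction = "S"
    · subst hS
      have hinv : InvG grid.length (grid.getD 0 []).length grid := by
        refine ⟨rfl, ?_⟩
        intro i hi
        have := hrows (by right; left; rfl) grid[i] (List.getElem_mem hi)
        rwa [hhd] at this
      simp only [boulder_optim, boulder_optim_alt]
      rw [if_neg (by decide : ¬ (("S":String) == "N") = true),
          if_pos (by decide : (("S":String) == "S") = true),
          if_pos (by decide : ((("S":String) == "N") || (("S":String) == "S")) = true)]
      simp only [show (("S":String) == "S") = true from rfl, if_true]
      apply L_foldl_inv (InvG grid.length (grid.getD 0 []).length) _ _ _ grid _ hinv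
      intro g x hP hmem
      have hxW : x < (grid.getD 0 []).length := List.mem_range.mp hmem
      have hnew : ((rollLineB ((colF x g).reverse)).reverse).length = g.length := by
        simp [L_rollLineB_length, colF]
      constructor
      · rw [L_colS grid.length (grid.getD 0 []).length x g hP hxW]
        rw [show (List.range grid.length).map (fun y => pvGet2 g y x) =
            (List.range g.length).map (fun y => pvGet2 g y x) by rw [hP.1]]
        rw [L_colB, show List.range grid.length = List.range g.length by rw [hP.1]]
        rw [L_wb0 x ((rollLineB ((colF x g).reverse)).reverse) g (by omega)]
      · rw [show (List.range grid.length).map (fun y => pvGet2 g y x) =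
            (List.range g.length).map (fun y => pvGet2 g y x) by rw [hP.1]]
        rw [L_colB, show List.range grid.length = List.range g.length by rw [hP.1]]
        rw [L_wb0 x ((rollLineB ((colF x g).reverse)).reverse) g (by omega)]
        exact L_inv_wcol _ _ g x _ hP (by omega)
    · by_cases hE : direction = "E"
      · subst hE
        have hinv : InvG grid.length (grid.getD 0 []).length grid := by
          refine ⟨rfl, ?_⟩
          intro i hi
          have := hrows (by right; right; left; rfl) grid[i] (List.getElem_mem hi)
          rwa [hhd] at this
        simp only [boulder_optim, boulder_optim_alt]
        rw [if_neg (by decide : ¬ (("E":String) == "N") = true),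
            if_neg (by decide : ¬ (("E":String) == "S") = true),
            if_pos (by decide : (("E":String) == "E") = true),
            if_neg (by decide : ¬ ((("E":String) == "N") || (("E":String) == "S")) = true),
            if_pos (by decide : ((("E":String) == "E") || (("E":String) == "W")) = true)]
        simp only [show (("E":String) == "E") = true from rfl, if_true]
        apply L_foldl_inv (InvG grid.length (grid.getD 0 []).length) _ _ _ grid _ hinv
        intro g y hP hmem
        have hyH : y < grid.length := List.mem_range.mp hmem
        have hyg : y < g.length := by have := hP.1; omega
        have hWrow : (grid.getD 0 []).length ≤ (g.getD y []).length := by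
          rw [List.getD_eq_getElem?_getD (l := g), List.getElem?_eq_getElem hyg, Option.getD_some]
          exact hP.2 y hyg
        have hlen : ((rollLineB (((g.getD y []).take (grid.getD 0 []).length).reverse)).reverse
            ++ (g.getD y []).drop (grid.getD 0 []).length).length ≥ (grid.getD 0 []).length := by
          rw [List.length_append, List.length_reverse, L_rollLineB_length,
            List.length_reverse, List.length_take]
          omega
        constructor
        · rw [L_rowE grid.length (grid.getD 0 []).length y g hP hyH]
        · exact L_inv_set_row _ _ g y _ hP hlen
      · by_cases hW : direction = "W"
        · subst hW
          have hinv : InvG grid.length (grid.getD 0 []).length grid := by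
            refine ⟨rfl, ?_⟩
            intro i hi
            have := hrows (by right; right; right; rfl) grid[i] (List.getElem_mem hi)
            rwa [hhd] at this
          simp only [boulder_optim, boulder_optim_alt]
          rw [if_neg (by decide : ¬ (("W":String) == "N") = true),
              if_neg (by decide : ¬ (("W":String) == "S") = true),
              if_neg (by decide : ¬ (("W":String) == "E") = true),
              if_pos (by decide : (("W":String) == "W") = true),
              if_neg (by decide : ¬ ((("W":String) == "N") || (("W":String) == "S")) = true),
              if_pos (by decide : ((("W":String) == "E") || (("W":String) == "W")) = true)]
          simp only [show (("W":String) == "E") = false from rfl, Bool.false_eq_true, if_false]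
          apply L_foldl_inv (InvG grid.length (grid.getD 0 []).length) _ _ _ grid _ hinv
          intro g y hP hmem
          have hyH : y < grid.length := List.mem_range.mp hmem
          have hyg : y < g.length := by have := hP.1; omega
          have hWrow : (grid.getD 0 []).length ≤ (g.getD y []).length := by
            rw [List.getD_eq_getElem?_getD (l := g), List.getElem?_eq_getElem hyg, Option.getD_some]
            exact hP.2 y hyg
          have hlen : ((rollLineB ((g.getD y []).take (grid.getD 0 []).length))
              ++ (g.getD y []).drop (grid.getD 0 []).length).length ≥ (grid.getD 0 []).length := by
            rw [List.length_append, L_rollLineB_length, List.length_take]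
            omega
          constructor
          · rw [L_rowW grid.length (grid.getD 0 []).length y g hP hyH]
          · exact L_inv_set_row _ _ g y _ hP hlen
        · simp only [boulder_optim, boulder_optim_alt, beq_iff_eq, hN, hS, hE, hW,
            if_false, Bool.or_eq_true, or_self]

-- ===== VERDICT (by name: the statement is the Claim_ definition above) =====
theorem boulder_optim_spec : Claim_equal_boulder_optim := by
  intro grid direction _ hpre
  unfold Spec_boulder_optim
  exact main_eq grid direction hpre
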